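-- pv_equiv track=rewrite | github.com/dholman7/danholman-portfolio | scripts/validation/issue_fixer.py | _fix_outdated_references
-- ===== SOURCE A (Python) =====
-- def _fix_outdated_references(content: str) -> str:
--     """Fix outdated references to old module names."""
--     replacements = {
--         "AI Test Generation": "AI Rulesets",
--         "ai-test-generation": "ai-rulesets",
--         "ai_test_generation": "ai_rulesets"
--     }
--
--     for old_ref, new_ref in replacements.items():
--         content = content.replace(old_ref, new_ref)
--
--     return content
-- ===== SOURCE B (Python) =====
-- def _fix_outdated_references(content: str) -> str:
--     """Fix outdated references to old module names in one left-to-right scan."""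
--     pairs = (("AI Test Generation", "AI Rulesets"),
--              ("ai-test-generation", "ai-rulesets"),
--              ("ai_test_generation", "ai_rulesets"))
--     out, i = [], 0
--     while i < len(content):
--         for old, new in pairs:
--             if content.startswith(old, i):
--                 out.append(new)
--                 i += len(old)
--                 break
--         else:
--             out.append(content[i])
--             i += 1
--     return "".join(out)
-- ===== Notes on version B (the rewrite author's own statement) =====
-- stated objective: alternative
-- what changed: Replaces A's three sequential full-string .replace passes (each rebuilding the whole string) with a single left-to-right scan that at each position tries the three mutually incompatible tokens and emits the replacement or copies one character.
import Mathlib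
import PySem

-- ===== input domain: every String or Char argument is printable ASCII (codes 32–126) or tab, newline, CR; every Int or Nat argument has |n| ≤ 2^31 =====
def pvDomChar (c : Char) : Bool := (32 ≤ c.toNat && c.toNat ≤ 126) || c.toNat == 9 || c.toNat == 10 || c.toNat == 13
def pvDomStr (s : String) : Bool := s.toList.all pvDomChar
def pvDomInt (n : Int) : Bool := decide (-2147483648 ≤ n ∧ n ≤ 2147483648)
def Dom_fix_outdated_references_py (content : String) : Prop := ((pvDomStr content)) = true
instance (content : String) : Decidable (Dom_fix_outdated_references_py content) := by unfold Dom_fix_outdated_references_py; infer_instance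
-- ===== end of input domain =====

-- B replaces A's three sequential full-string `.replace` passes with one left-to-right scan that
-- tries the three (mutually incompatible) tokens at each position; same return value, alternative traversal.

-- ===== PORT A =====
-- Python A: a dict of replacements, then `for old_ref, new_ref in replacements.items(): content = content.replace(old_ref, new_ref)`.
def fix_outdated_references_py (content : String) : String :=
  let replacements : List (String × String) :=
    [("AI Test Generation", "AI Rulesets"),
     ("ai-test-generation", "ai-rulesets"),
     ("ai_test_generation", "ai_rulesets")]
  replacements.foldl (fun content p => PySem.Str.replace content p.1 p.2) content

-- ===== PORT B =====
-- B's while-loop over positions: at each index try the three tokens (dict order) with startswith,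
-- emit the replacement and jump by the token's length, else copy one character.
def pvScanB : List Char → List Char
  | [] => []
  | c :: t =>
    if "AI Test Generation".toList <+: c :: t then
      "AI Rulesets".toList ++ pvScanB ((c :: t).drop "AI Test Generation".toList.length)
    else if "ai-test-generation".toList <+: c :: t then
      "ai-rulesets".toList ++ pvScanB ((c :: t).drop "ai-test-generation".toList.length)
    else if "ai_test_generation".toList <+: c :: t then
      "ai_rulesets".toList ++ pvScanB ((c :: t).drop "ai_test_generation".toList.length)
    else c :: pvScanB t
  termination_by l => l.length
  decreasing_by all_goals simp

def fix_outdated_references_py_alt (content : String) : String :=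
  String.ofList (pvScanB content.toList)

-- ===== PRECONDITION & SPEC =====
def Spec_fix_outdated_references_py (content : String) (out : String) : Prop := out = fix_outdated_references_py_alt content
instance (content : String) (out : String) : Decidable (Spec_fix_outdated_references_py content out) := by unfold Spec_fix_outdated_references_py; infer_instance

-- ===== CLAIM (what is proved, stated in full; the proofs are below) =====
def Claim_equal_fix_outdated_references_py : Prop := ∀ (content : String), Dom_fix_outdated_references_py content → Spec_fix_outdated_references_py content (fix_outdated_references_py content)

-- ===== LEMMAS AND PROOFS =====

-- A simple (unfueled, no accumulator) form of Python's str.replace for a nonempty pattern.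
def pvRepS (old new : List Char) : List Char → List Char
  | [] => []
  | c :: t =>
    if old ≠ [] ∧ old <+: c :: t then
      new ++ pvRepS old new ((c :: t).drop old.length)
    else c :: pvRepS old new t
  termination_by l => l.length
  decreasing_by
    · have : old ≠ [] := by tauto
      have : 0 < old.length := List.length_pos_iff.mpr this
      simp; omega
    · simp

theorem pvRepS_pos (old new l : List Char) (h : old ≠ []) (hp : old <+: l) :
    pvRepS old new l = new ++ pvRepS old new (l.drop old.length) := by
  cases l with
  | nil => exact absurd (List.prefix_nil.mp hp) h
  | cons c t => rw [pvRepS, if_pos ⟨h, hp⟩]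

theorem pvRepS_cons (old new : List Char) (c : Char) (t : List Char)
    (h : ¬ (old ≠ [] ∧ old <+: c :: t)) :
    pvRepS old new (c :: t) = c :: pvRepS old new t := by
  rw [pvRepS, if_neg h]

theorem pvPrefix_append {x u w : List Char} (h : x <+: u ++ w) : x <+: u ∨ u <+: x :=
  List.prefix_or_prefix_of_prefix h (List.prefix_append u w)

-- no occurrence of `old` can start inside `u` (even straddling into what follows)
def pvSafe (old u : List Char) : Prop :=
  ∀ v ∈ u.tails, v ≠ [] → ¬ old <+: v ∧ ¬ v <+: old

theorem pvRepS_append (old new u w : List Char) (h : pvSafe old u) :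
    pvRepS old new (u ++ w) = u ++ pvRepS old new w := by
  induction u with
  | nil => simp
  | cons c t ih =>
    have hcond : ¬ (old ≠ [] ∧ old <+: c :: (t ++ w)) := by
      rintro ⟨hne, hp⟩
      have hmem : (c :: t) ∈ (c :: t).tails := (List.mem_tails _ _).mpr (List.suffix_refl _)
      have hv := h (c :: t) hmem (by simp)
      rcases pvPrefix_append (x := old) (u := c :: t) (w := w) hp with h1 | h1
      · exact hv.1 h1
      · exact hv.2 h1
    have : (c :: t) ++ w = c :: (t ++ w) := rfl
    rw [this, pvRepS_cons _ _ _ _ hcond,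
        ih (fun v hv hne => h v ((List.mem_tails _ _).mpr (((List.mem_tails _ _).mp hv).trans (List.suffix_cons c t))) hne)]
    simp

-- `u` cannot appear as a prefix of a replaced string unless it was a prefix before:
-- no nonempty suffix of `u` is prefix-comparable with `old` or with `new`.
def pvClean (old new u : List Char) : Prop :=
  ∀ v ∈ u.tails, v ≠ [] → ¬ old <+: v ∧ ¬ v <+: old ∧ ¬ new <+: v ∧ ¬ v <+: new

theorem pvRepS_prefix_iff (old new : List Char) :
    ∀ (z u : List Char), pvClean old new u → (u <+: pvRepS old new z ↔ u <+: z) := by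
  intro z
  induction z using pvRepS.induct old with
  | case1 => simp [pvRepS]
  | case2 c t hc ih =>
    intro u hu
    rw [pvRepS, if_pos hc]
    cases u with
    | nil => simp
    | cons d u' =>
      have hv := hu (d :: u') ((List.mem_tails _ _).mpr (List.suffix_refl _)) (by simp)
      constructor
      · intro hp
        rcases pvPrefix_append hp with h1 | h1
        · exact absurd h1 hv.2.2.2
        · exact absurd h1 hv.2.2.1
      · intro hp
        obtain ⟨w, hw⟩ := hc.2
        rw [← hw] at hp
        rcases pvPrefix_append hp with h1 | h1
        · exact absurd h1 hv.2.1
        · exact absurd h1 hv.1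
  | case3 c t hc ih =>
    intro u hu
    rw [pvRepS, if_neg hc]
    cases u with
    | nil => simp
    | cons d u' =>
      rw [List.cons_prefix_cons, List.cons_prefix_cons,
          ih u' (fun v hv hne => hu v ((List.mem_tails _ _).mpr (((List.mem_tails _ _).mp hv).trans (List.suffix_cons d u'))) hne)]

theorem pvMain (s : List Char) :
    pvRepS "ai_test_generation".toList "ai_rulesets".toList
      (pvRepS "ai-test-generation".toList "ai-rulesets".toList
        (pvRepS "AI Test Generation".toList "AI Rulesets".toList s)) = pvScanB s := by
  induction s using pvScanB.induct with
  | case1 => simp [pvRepS, pvScanB]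
  | case2 c t h1 ih =>
    obtain ⟨w, hw⟩ := h1
    have hdrop : (c :: t).drop "AI Test Generation".toList.length = w := by
      rw [← hw]; exact List.drop_left
    rw [hdrop] at ih
    calc pvRepS "ai_test_generation".toList "ai_rulesets".toList
          (pvRepS "ai-test-generation".toList "ai-rulesets".toList
            (pvRepS "AI Test Generation".toList "AI Rulesets".toList (c :: t)))
        = "AI Rulesets".toList ++ pvRepS "ai_test_generation".toList "ai_rulesets".toList
            (pvRepS "ai-test-generation".toList "ai-rulesets".toList
              (pvRepS "AI Test Generation".toList "AI Rulesets".toList w)) := by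
          rw [pvRepS_pos _ _ _ (by decide) ⟨w, hw⟩, hdrop,
              pvRepS_append "ai-test-generation".toList "ai-rulesets".toList "AI Rulesets".toList _ (by unfold pvSafe; decide),
              pvRepS_append "ai_test_generation".toList "ai_rulesets".toList "AI Rulesets".toList _ (by unfold pvSafe; decide)]
      _ = pvScanB (c :: t) := by rw [ih, pvScanB, if_pos ⟨w, hw⟩, hdrop]
  | case3 c t h1 h2 ih =>
    obtain ⟨w, hw⟩ := h2
    have hdrop : (c :: t).drop "ai-test-generation".toList.length = w := by
      rw [← hw]; exact List.drop_left
    rw [hdrop] at ih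
    calc pvRepS "ai_test_generation".toList "ai_rulesets".toList
          (pvRepS "ai-test-generation".toList "ai-rulesets".toList
            (pvRepS "AI Test Generation".toList "AI Rulesets".toList (c :: t)))
        = pvRepS "ai_test_generation".toList "ai_rulesets".toList
            (pvRepS "ai-test-generation".toList "ai-rulesets".toList
              ("ai-test-generation".toList ++ pvRepS "AI Test Generation".toList "AI Rulesets".toList w)) := by
          rw [← hw, pvRepS_append "AI Test Generation".toList "AI Rulesets".toList "ai-test-generation".toList _ (by unfold pvSafe; decide)]
      _ = "ai-rulesets".toList ++ pvRepS "ai_test_generation".toList "ai_rulesets".toList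
            (pvRepS "ai-test-generation".toList "ai-rulesets".toList
              (pvRepS "AI Test Generation".toList "AI Rulesets".toList w)) := by
          rw [pvRepS_pos _ _ _ (by decide) (List.prefix_append _ _), List.drop_left,
              pvRepS_append "ai_test_generation".toList "ai_rulesets".toList "ai-rulesets".toList _ (by unfold pvSafe; decide)]
      _ = pvScanB (c :: t) := by rw [ih, pvScanB, if_neg h1, if_pos ⟨w, hw⟩, hdrop]
  | case4 c t h1 h2 h3 ih =>
    obtain ⟨w, hw⟩ := h3
    have hdrop : (c :: t).drop "ai_test_generation".toList.length = w := by
      rw [← hw]; exact List.drop_left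
    rw [hdrop] at ih
    calc pvRepS "ai_test_generation".toList "ai_rulesets".toList
          (pvRepS "ai-test-generation".toList "ai-rulesets".toList
            (pvRepS "AI Test Generation".toList "AI Rulesets".toList (c :: t)))
        = pvRepS "ai_test_generation".toList "ai_rulesets".toList
            ("ai_test_generation".toList ++ pvRepS "ai-test-generation".toList "ai-rulesets".toList
              (pvRepS "AI Test Generation".toList "AI Rulesets".toList w)) := by
          rw [← hw, pvRepS_append "AI Test Generation".toList "AI Rulesets".toList "ai_test_generation".toList _ (by unfold pvSafe; decide),
              pvRepS_append "ai-test-generation".toList "ai-rulesets".toList "ai_test_generation".toList _ (by unfold pvSafe; decide)]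
      _ = "ai_rulesets".toList ++ pvRepS "ai_test_generation".toList "ai_rulesets".toList
            (pvRepS "ai-test-generation".toList "ai-rulesets".toList
              (pvRepS "AI Test Generation".toList "AI Rulesets".toList w)) := by
          rw [pvRepS_pos _ _ _ (by decide) (List.prefix_append _ _), List.drop_left]
      _ = pvScanB (c :: t) := by rw [ih, pvScanB, if_neg h1, if_neg h2, if_pos ⟨w, hw⟩, hdrop]
  | case5 c t h1 h2 h3 ih =>
    have e1 : pvRepS "AI Test Generation".toList "AI Rulesets".toList (c :: t)
        = c :: pvRepS "AI Test Generation".toList "AI Rulesets".toList t :=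
      pvRepS_cons _ _ _ _ (fun h => h1 h.2)
    have h2' : ¬ "ai-test-generation".toList <+:
        pvRepS "AI Test Generation".toList "AI Rulesets".toList (c :: t) := by
      rw [pvRepS_prefix_iff _ _ (c :: t) _ (by unfold pvClean; decide)]; exact h2
    have e2 : pvRepS "ai-test-generation".toList "ai-rulesets".toList
          (pvRepS "AI Test Generation".toList "AI Rulesets".toList (c :: t))
        = c :: pvRepS "ai-test-generation".toList "ai-rulesets".toList
            (pvRepS "AI Test Generation".toList "AI Rulesets".toList t) := by
      rw [e1] at h2' ⊢
      exact pvRepS_cons _ _ _ _ (fun h => h2' h.2)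
    have h3' : ¬ "ai_test_generation".toList <+:
        pvRepS "ai-test-generation".toList "ai-rulesets".toList
          (pvRepS "AI Test Generation".toList "AI Rulesets".toList (c :: t)) := by
      rw [pvRepS_prefix_iff _ _ _ _ (by unfold pvClean; decide),
          pvRepS_prefix_iff _ _ (c :: t) _ (by unfold pvClean; decide)]
      exact h3
    rw [e2] at h3' ⊢
    rw [pvRepS_cons _ _ _ _ (fun h => h3' h.2), ih,
        pvScanB, if_neg h1, if_neg h2, if_neg h3]

theorem pvGo_eq (old new : List Char) (h : old ≠ []) :
    ∀ (fuel : Nat) (l acc : List Char), l.length ≤ fuel →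
      PySem.Chars.replace.go old new fuel l acc = acc.reverse ++ pvRepS old new l := by
  intro fuel
  induction fuel with
  | zero =>
    intro l acc hl
    have hnil : l = [] := List.length_eq_zero_iff.mp (Nat.le_zero.mp hl)
    subst hnil
    rw [PySem.Chars.replace.go]
    simp [pvRepS]
  | succ f ihf =>
    intro l acc hl
    cases l with
    | nil =>
      rw [PySem.Chars.replace.go]
      · simp [pvRepS]
      · omega
    | cons c t =>
      rw [PySem.Chars.replace.go]
      by_cases hp : old.isPrefixOf (c :: t)
      · rw [if_pos hp]
        have hp' : old <+: c :: t := List.isPrefixOf_iff_prefix.mp hp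
        have hpos : 0 < old.length := List.length_pos_iff.mpr h
        have hlen : (List.drop old.length (c :: t)).length ≤ f := by
          simp at hl ⊢; omega
        rw [ihf _ _ hlen, pvRepS_pos _ _ _ h hp']
        simp
      · rw [if_neg hp]
        have hlen : t.length ≤ f := by simp at hl; omega
        rw [ihf t (c :: acc) hlen,
            pvRepS_cons _ _ _ _ (fun hh => hp (List.isPrefixOf_iff_prefix.mpr hh.2))]
        simp

theorem pvReplace_eq (s old new : List Char) (h : old ≠ []) :
    PySem.Chars.replace s old new = pvRepS old new s := by
  unfold PySem.Chars.replace
  rw [if_neg (by simpa using h : ¬ old.isEmpty = true)]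
  simpa using pvGo_eq old new h s.length s [] le_rfl

-- ===== VERDICT (by name: the statement is the Claim_ definition above) =====
theorem fix_outdated_references_py_spec : Claim_equal_fix_outdated_references_py := by
  intro content _
  unfold Spec_fix_outdated_references_py fix_outdated_references_py fix_outdated_references_py_alt
  simp only [List.foldl]
  unfold PySem.Str.replace
  simp only [String.toList_ofList]
  rw [pvReplace_eq _ _ _ (by decide), pvReplace_eq _ _ _ (by decide),
      pvReplace_eq _ _ _ (by decide), pvMain]
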